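-- pv_equiv track=rewrite | github.com/bgx/nand2tetris | src/projectEX1/MyTools/vmtranslator/vmtranslator2.py | write_pop_store_from_D_2
-- ===== SOURCE A (Python) =====
-- def write_pop_store_from_D_2(index):
--     if(index == 0):
--         asm = ( 'A=M'   + '\n'
--                 'M=D' )
--     else:
--         asm = 'A=M+1' + '\n'
--         index -= 1
--         while( index > 0 ):
--             asm = asm + 'A=A+1' + '\n'
--             index -= 1
--         asm = asm + 'M=D'
--     return asm
-- ===== SOURCE B (Python) =====
-- def write_pop_store_from_D_2(index):
--     if index == 0:
--         return 'A=M\nM=D'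
--     return 'A=M+1\n' + 'A=A+1\n' * (index - 1) + 'M=D'
-- ===== Notes on version B (the rewrite author's own statement) =====
-- stated objective: simpler
-- what changed: Replaces the while-loop accumulation of 'A=A+1' lines with a single closed-form string-repetition expression 'A=A+1\n'*(index-1).
import Mathlib
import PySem

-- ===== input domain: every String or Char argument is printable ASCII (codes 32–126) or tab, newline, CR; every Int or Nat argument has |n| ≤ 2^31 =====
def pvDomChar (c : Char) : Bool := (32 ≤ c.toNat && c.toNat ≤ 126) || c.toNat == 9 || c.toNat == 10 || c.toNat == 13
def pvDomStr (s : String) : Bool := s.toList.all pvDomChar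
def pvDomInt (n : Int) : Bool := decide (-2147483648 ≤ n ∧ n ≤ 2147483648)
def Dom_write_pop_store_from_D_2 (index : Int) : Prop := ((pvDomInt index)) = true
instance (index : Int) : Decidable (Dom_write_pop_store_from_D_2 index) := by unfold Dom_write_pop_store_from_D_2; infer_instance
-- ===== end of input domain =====

-- B replaces A's while loop with one closed-form repetition expression (simpler; same result).

-- ===== PORT A =====
-- the while loop of A: repeatedly append 'A=A+1\n' while index > 0
def pvLoopA (asm : List Char) (index : Int) : List Char :=
  if index > 0 then pvLoopA (asm ++ "A=A+1\n".toList) (index - 1) else asm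
termination_by index.toNat
decreasing_by omega

def write_pop_store_from_D_2 (index : Int) : String :=
  if index == 0 then
    String.ofList ("A=M\nM=D".toList)
  else
    String.ofList (pvLoopA ("A=M+1\n".toList) (index - 1) ++ "M=D".toList)

-- ===== PORT B =====
def write_pop_store_from_D_2_alt (index : Int) : String :=
  if index == 0 then
    "A=M\nM=D"
  else
    String.ofList ("A=M+1\n".toList ++ PySem.List.pyRepeat "A=A+1\n".toList (index - 1) ++ "M=D".toList)

-- ===== PRECONDITION & SPEC =====
def Spec_write_pop_store_from_D_2 (index : Int) (out : String) : Prop := out = write_pop_store_from_D_2_alt index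
instance (index : Int) (out : String) : Decidable (Spec_write_pop_store_from_D_2 index out) := by unfold Spec_write_pop_store_from_D_2; infer_instance

-- ===== CLAIM (what is proved, stated in full; the proofs are below) =====
def Claim_equal_write_pop_store_from_D_2 : Prop := ∀ (index : Int), Dom_write_pop_store_from_D_2 index → Spec_write_pop_store_from_D_2 index (write_pop_store_from_D_2 index)

-- ===== LEMMAS AND PROOFS =====
theorem pvLoopA_nat (n : Nat) (asm : List Char) :
    pvLoopA asm (n : Int) = asm ++ (List.replicate n "A=A+1\n".toList).flatten := by
  induction n generalizing asm with
  | zero => rw [pvLoopA]; simp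
  | succ m ih =>
      rw [pvLoopA]
      have h1 : ((m + 1 : Nat) : Int) > 0 := by positivity
      have h2 : ((m + 1 : Nat) : Int) - 1 = (m : Int) := by push_cast; ring
      rw [if_pos h1, h2, ih]
      simp [List.replicate_succ]

theorem pvLoopA_eq (index : Int) (asm : List Char) :
    pvLoopA asm index = asm ++ PySem.List.pyRepeat "A=A+1\n".toList index := by
  unfold PySem.List.pyRepeat
  by_cases h : index ≤ 0
  · rw [pvLoopA, if_neg (by omega)]
    rw [Int.toNat_of_nonpos h]
    simp
  · have h2 : index = (index.toNat : Int) := by omega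
    rw [h2, pvLoopA_nat, Int.toNat_natCast]

-- ===== VERDICT (by name: the statement is the Claim_ definition above) =====
theorem write_pop_store_from_D_2_spec : Claim_equal_write_pop_store_from_D_2 := by
  intro index _
  unfold Spec_write_pop_store_from_D_2 write_pop_store_from_D_2 write_pop_store_from_D_2_alt
  split
  · rfl
  · rw [pvLoopA_eq]
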